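-- pv_equiv track=rewrite | github.com/Sai-Nithin-Sangekari/DISCOURSE-CONNECTIVE-MARKER-TOOL | sentence_simplification/check.py | same_id_check
-- ===== SOURCE A (Python) =====
-- def same_id_check(output_lines):
--     result = []
--     ids_by_sentence = {}
--     sentences_by_id = {}
--
--     for line in output_lines:
--         parts = line.split()
--
--         sentence_id = parts[0]
--         sentence = ' '.join(parts[3:-1])
--
--         if sentence not in ids_by_sentence:
--             ids_by_sentence[sentence] = [sentence_id]
--         else:
--             ids_by_sentence[sentence].append(sentence_id)
--         if sentence_id not in sentences_by_id:
--             sentences_by_id[sentence_id] = [sentence]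
--         else:
--             sentences_by_id[sentence_id].append(sentence)
--
--     for sentence_id, sentences in sentences_by_id.items():
--         if len(set(sentences)) > 1:
--             result.append(sentence_id + "\tSame ID is present.")
--
--     return result
-- ===== SOURCE B (Python) =====
-- def same_id_check(output_lines):
--     first_seen = {}
--     conflicting = set()
--
--     for line in output_lines:
--         parts = line.split()
--
--         sentence_id = parts[0]
--         sentence = ' '.join(parts[3:-1])
--
--         if sentence_id not in first_seen:
--             first_seen[sentence_id] = sentence
--         elif first_seen[sentence_id] != sentence:
--             conflicting.add(sentence_id)
--
--     return [sid + "\tSame ID is present." for sid in first_seen if sid in conflicting]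
-- ===== Notes on version B (the rewrite author's own statement) =====
-- stated objective: faster
-- what changed: Replaces A's two dicts of growing lists (including the dead ids_by_sentence dict) plus a final set() over each id's whole sentence list by one pass that keeps only the first sentence per id and a set of ids already seen to conflict.
import Mathlib
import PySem

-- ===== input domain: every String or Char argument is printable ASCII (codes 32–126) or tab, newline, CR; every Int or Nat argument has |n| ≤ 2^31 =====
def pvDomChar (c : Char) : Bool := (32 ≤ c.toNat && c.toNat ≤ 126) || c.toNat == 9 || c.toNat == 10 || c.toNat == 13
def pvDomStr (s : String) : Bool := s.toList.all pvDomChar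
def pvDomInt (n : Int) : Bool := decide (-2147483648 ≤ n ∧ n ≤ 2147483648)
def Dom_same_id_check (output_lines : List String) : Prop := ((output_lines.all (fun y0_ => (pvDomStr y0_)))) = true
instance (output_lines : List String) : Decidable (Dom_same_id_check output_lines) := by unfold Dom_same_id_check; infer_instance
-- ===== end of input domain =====

-- B drops A's dead ids_by_sentence dict and the per-id sentence lists: one pass keeps only the
-- first sentence per id plus a set of conflicting ids (same return value; A and B raise alike).

-- ===== PORT A =====
-- one iteration of A's for-loop: state = (ids_by_sentence, sentences_by_id)
def pvAStep (st : PySem.Dict String (List String) × PySem.Dict String (List String))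
    (line : String) : PySem.Dict String (List String) × PySem.Dict String (List String) :=
  let parts := PySem.Str.split₀ line
  -- parts[0]: Pre_ excludes lines whose split is empty (Python raises IndexError there)
  let sentence_id := PySem.List.pyGetD parts 0 ""
  let sentence := PySem.Str.join " " (PySem.List.slice parts (some 3) (some (-1)))
  let ids_by_sentence :=
    if st.1.contains sentence = false then st.1.insert sentence [sentence_id]
    else st.1.modify sentence [] (fun l => l ++ [sentence_id])   -- d[sentence].append(sentence_id)
  let sentences_by_id :=
    if st.2.contains sentence_id = false then st.2.insert sentence_id [sentence]
    else st.2.modify sentence_id [] (fun l => l ++ [sentence])   -- d[sentence_id].append(sentence)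
  (ids_by_sentence, sentences_by_id)

def same_id_check (output_lines : List String) : List String :=
  let st := output_lines.foldl pvAStep (PySem.Dict.empty, PySem.Dict.empty)
  st.2.items.foldl
    (fun result p =>
      if 1 < (PySem.Set.ofList p.2).length then result ++ [p.1 ++ "\tSame ID is present."]
      else result)
    []

-- ===== PORT B =====
-- one iteration of B's for-loop: state = (first_seen, conflicting)
def pvBStep (st : PySem.Dict String String × PySem.Set String)
    (line : String) : PySem.Dict String String × PySem.Set String :=
  let parts := PySem.Str.split₀ line
  -- parts[0]: Pre_ excludes lines whose split is empty (Python raises IndexError there)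
  let sentence_id := PySem.List.pyGetD parts 0 ""
  let sentence := PySem.Str.join " " (PySem.List.slice parts (some 3) (some (-1)))
  if st.1.contains sentence_id = false then (st.1.insert sentence_id sentence, st.2)
  else if st.1.getD sentence_id "" ≠ sentence then (st.1, PySem.Set.add st.2 sentence_id)
  else st

def same_id_check_alt (output_lines : List String) : List String :=
  let st := output_lines.foldl pvBStep (PySem.Dict.empty, PySem.Set.empty)
  (st.1.keys.filter (fun sid => PySem.Set.contains st.2 sid)).map
    (fun sid => sid ++ "\tSame ID is present.")

-- ===== PRECONDITION & SPEC =====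
-- Pre_ excludes exactly the inputs where Python A raises: a line with no non-whitespace
-- character splits into no parts, so parts[0] raises IndexError (B raises there too).
def Pre_same_id_check (output_lines : List String) : Prop :=
  ∀ line ∈ output_lines, PySem.Str.split₀ line ≠ []
instance (output_lines : List String) : Decidable (Pre_same_id_check output_lines) := by
  unfold Pre_same_id_check; infer_instance

def pvWitness_same_id_check : List String :=
  ["1 x y hello world end", "1 x y other words end", "2 x y hello world end"]

def Spec_same_id_check (output_lines : List String) (out : List String) : Prop :=
  out = same_id_check_alt output_lines
instance (output_lines : List String) (out : List String) :
    Decidable (Spec_same_id_check output_lines out) := by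
  unfold Spec_same_id_check; infer_instance

-- ===== CLAIM (what is proved, stated in full; the proofs are below) =====
def Claim_equal_same_id_check : Prop :=
  ∀ (output_lines : List String), Dom_same_id_check output_lines →
    Pre_same_id_check output_lines →
    Spec_same_id_check output_lines (same_id_check output_lines)


-- ===== LEMMAS AND PROOFS =====

-- get? read off from contains and getD (PySem has no get?_modify lemma; this bridges)
theorem pv_get?_eq_some_getD {ν : Type} (d : PySem.Dict String ν) (k : String) (d0 : ν)
    (h : d.contains k = true) : d.get? k = some (d.getD k d0) := by
  cases hg : d.get? k with
  | none => rw [PySem.Dict.get?_eq_none_iff_contains] at hg; simp [hg] at h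
  | some v => rw [PySem.Dict.getD_eq_get?_getD, hg]; rfl

-- len(set(ss)) > 1 iff some element of ss differs from its first element
theorem pvSetLen (ss : List String) (h : ss ≠ []) :
    (1 < (PySem.Set.ofList ss).length) ↔ ∃ x ∈ ss, x ≠ ss.headD "" := by
  obtain ⟨a, t, rfl⟩ := List.exists_cons_of_ne_nil h
  rw [PySem.Set.ofList_cons]
  simp only [List.length_cons, List.headD_cons]
  have hiff : (PySem.Set.ofList t).discard a ≠ [] ↔ ∃ x ∈ t, x ≠ a := by
    constructor
    · intro hne
      obtain ⟨x, hx⟩ := List.exists_mem_of_ne_nil _ hne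
      have hx' := (PySem.Set.mem_discard _ a x).mp hx
      refine ⟨x, ?_, hx'.2⟩
      have := hx'.1
      rw [PySem.Set.mem_ofList] at this
      exact this
    · rintro ⟨x, hxt, hxa⟩
      refine List.ne_nil_of_mem ((PySem.Set.mem_discard _ a x).mpr ⟨?_, hxa⟩)
      rw [PySem.Set.mem_ofList]; exact hxt
  constructor
  · intro hlen
    have hne : (PySem.Set.ofList t).discard a ≠ [] := by
      intro hnil; rw [hnil] at hlen; simp at hlen
    obtain ⟨x, hxt, hxa⟩ := hiff.mp hne
    exact ⟨x, List.mem_cons_of_mem _ hxt, hxa⟩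
  · rintro ⟨x, hx, hxa⟩
    have hxt : x ∈ t := by
      rcases List.mem_cons.mp hx with h' | h'
      · exact absurd h' hxa
      · exact h'
    have hne := hiff.mpr ⟨x, hxt, hxa⟩
    have := List.length_pos_of_ne_nil hne
    omega

-- the invariant tying A's sentences_by_id to B's (first_seen, conflicting)
def pvInv (sids : PySem.Dict String (List String))
    (fs : PySem.Dict String String) (conf : PySem.Set String) : Prop :=
  sids.keys = fs.keys ∧ sids.keys.Nodup ∧
  (∀ k, k ∈ conf → k ∈ sids.keys) ∧
  (∀ k ss, sids.get? k = some ss →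
    ss ≠ [] ∧ fs.getD k "" = ss.headD "" ∧ (k ∈ conf ↔ ∃ x ∈ ss, x ≠ ss.headD ""))

theorem pvInv_empty : pvInv PySem.Dict.empty PySem.Dict.empty PySem.Set.empty := by
  refine ⟨rfl, by simp [PySem.Dict.keys_empty], by simp [PySem.Set.empty], ?_⟩
  intro k ss h
  simp [PySem.Dict.get?_empty] at h

-- one loop iteration preserves the invariant (sid/sen are the parsed id and sentence)
theorem pvStep_core (sid sen : String)
    (sids : PySem.Dict String (List String))
    (fs : PySem.Dict String String) (conf : PySem.Set String)
    (h : pvInv sids fs conf) :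
    pvInv (if sids.contains sid = false then sids.insert sid [sen]
           else sids.modify sid [] (fun l => l ++ [sen]))
          (if fs.contains sid = false then fs.insert sid sen else fs)
          (if fs.contains sid = false then conf
           else if fs.getD sid "" ≠ sen then PySem.Set.add conf sid else conf) := by
  obtain ⟨hkeys, hnd, hsub, hval⟩ := h
  have hcont : sids.contains sid = fs.contains sid := by
    by_cases hm : sid ∈ fs.keys
    · rw [(PySem.Dict.contains_iff_mem_keys sids sid).mpr (hkeys ▸ hm),
        (PySem.Dict.contains_iff_mem_keys fs sid).mpr hm]
    · have h1 : ¬ sids.contains sid = true :=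
        fun hc => hm (hkeys ▸ (PySem.Dict.contains_iff_mem_keys sids sid).mp hc)
      have h2 : ¬ fs.contains sid = true :=
        fun hc => hm ((PySem.Dict.contains_iff_mem_keys fs sid).mp hc)
      simp at h1 h2; rw [h1, h2]
  cases hc : fs.contains sid with
  | false =>
    -- new key: insert into both dicts, conf unchanged
    have hsc : sids.contains sid = false := by rw [hcont, hc]
    have hnotmem : sid ∉ sids.keys := fun hm => by
      rw [← PySem.Dict.contains_iff_mem_keys] at hm; rw [hm] at hsc; cases hsc
    rw [if_pos hsc, if_pos (rfl : (false : Bool) = false), if_pos (rfl : (false : Bool) = false)]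
    refine ⟨?_, ?_, ?_, ?_⟩
    · rw [PySem.Dict.keys_insert_of_not_contains _ _ hsc,
        PySem.Dict.keys_insert_of_not_contains _ _ hc, hkeys]
    · exact PySem.Dict.nodup_keys_insert _ _ _ hnd
    · intro k hk
      exact (PySem.Dict.mem_keys_insert _ _ _ _).mpr (Or.inr (hsub k hk))
    · intro k ss hget
      rw [PySem.Dict.get?_insert] at hget
      by_cases hk : k = sid
      · subst k
        rw [if_pos rfl] at hget
        injection hget with hss; subst hss
        refine ⟨by simp, by rw [PySem.Dict.getD_insert_self]; simp, ?_⟩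
        simp only [List.mem_singleton, List.headD_cons]
        constructor
        · intro hkc; exact absurd (hsub _ hkc) hnotmem
        · rintro ⟨x, hx, hxne⟩; exact absurd hx hxne
      · rw [if_neg hk] at hget
        obtain ⟨h1, h2, h3⟩ := hval k ss hget
        exact ⟨h1, by rw [PySem.Dict.getD_insert_of_ne _ _ _ hk, h2], h3⟩
  | true =>
    -- existing key: append to A's list; B compares against the stored first sentence
    have hnf : ¬ (fs.contains sid = false) := by simp [hc]
    have hcs : sids.contains sid = true := by rw [hcont, hc]
    have hns : ¬ (sids.contains sid = false) := by simp [hcs]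
    have hmem : sid ∈ sids.keys := (PySem.Dict.contains_iff_mem_keys sids sid).mp hcs
    rw [if_neg hns, if_neg (by simp : ¬ ((true : Bool) = false)), if_neg (by simp : ¬ ((true : Bool) = false))]
    obtain ⟨ss0, hss0⟩ : ∃ ss0, sids.get? sid = some ss0 := by
      cases hg : sids.get? sid with
      | none => rw [PySem.Dict.get?_eq_none_iff_contains] at hg; rw [hg] at hcs; cases hcs
      | some v => exact ⟨v, rfl⟩
    obtain ⟨hne0, hfst0, hconf0⟩ := hval sid ss0 hss0
    have hgetD0 : sids.getD sid [] = ss0 := by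
      rw [PySem.Dict.getD_eq_get?_getD, hss0]; rfl
    have hget_mod : ∀ k, (sids.modify sid [] (fun l => l ++ [sen])).get? k =
        if k = sid then some (ss0 ++ [sen]) else sids.get? k := by
      intro k
      by_cases hk : k = sid
      · subst k
        rw [if_pos rfl]
        have hcm : (sids.modify sid [] (fun l => l ++ [sen])).contains sid = true := by
          rw [PySem.Dict.contains_modify]; simp
        rw [pv_get?_eq_some_getD _ _ [] hcm, PySem.Dict.getD_modify]
        simp [hgetD0]
      · rw [if_neg hk]
        have hcm : (sids.modify sid [] (fun l => l ++ [sen])).contains k = sids.contains k := by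
          rw [PySem.Dict.contains_modify]; simp [hk]
        cases hck : sids.contains k with
        | false =>
          have ha : (sids.modify sid [] (fun l => l ++ [sen])).get? k = none := by
            rw [PySem.Dict.get?_eq_none_iff_contains, hcm, hck]
          have hb : sids.get? k = none := by
            rw [PySem.Dict.get?_eq_none_iff_contains, hck]
          rw [ha, hb]
        | true =>
          rw [pv_get?_eq_some_getD _ _ [] (by rw [hcm, hck]),
            pv_get?_eq_some_getD _ _ [] hck, PySem.Dict.getD_modify, if_neg hk]
    have hkeys_mod : (sids.modify sid [] (fun l => l ++ [sen])).keys = sids.keys := by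
      rw [PySem.Dict.keys_modify, PySem.Dict.keys_insert_of_contains _ _ hcs]
    refine ⟨by rw [hkeys_mod, hkeys], by rw [hkeys_mod]; exact hnd, ?_, ?_⟩
    · intro k hk
      rw [hkeys_mod]
      by_cases hdne : fs.getD sid "" ≠ sen
      · rw [if_pos hdne] at hk
        rcases (PySem.Set.mem_add conf sid k).mp hk with hkc | hks
        · exact hsub k hkc
        · subst hks; exact hmem
      · rw [if_neg hdne] at hk; exact hsub k hk
    · intro k ss hget
      rw [hget_mod k] at hget
      by_cases hk : k = sid
      · subst k
        rw [if_pos rfl] at hget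
        injection hget with hss; subst hss
        have hhead : (ss0 ++ [sen]).headD "" = ss0.headD "" := by
          cases ss0 with
          | nil => exact absurd rfl hne0
          | cons a t => simp
        refine ⟨by simp, by rw [hfst0, hhead], ?_⟩
        rw [hhead]
        by_cases hdne : fs.getD sid "" ≠ sen
        · rw [if_pos hdne]
          constructor
          · intro _
            exact ⟨sen, by simp, by rw [← hfst0]; exact fun hh => hdne hh.symm⟩
          · intro _
            exact (PySem.Set.mem_add conf sid sid).mpr (Or.inr rfl)
        · rw [if_neg hdne]
          push Not at hdne
          rw [hconf0]
          constructor
          · rintro ⟨x, hx, hxne⟩; exact ⟨x, by simp [hx], hxne⟩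
          · rintro ⟨x, hx, hxne⟩
            rcases List.mem_append.mp hx with hx0 | hx1
            · exact ⟨x, hx0, hxne⟩
            · simp at hx1; subst hx1
              rw [← hfst0, hdne] at hxne; exact absurd rfl hxne
      · rw [if_neg hk] at hget
        obtain ⟨h1, h2, h3⟩ := hval k ss hget
        refine ⟨h1, h2, ?_⟩
        by_cases hdne : fs.getD sid "" ≠ sen
        · rw [if_pos hdne, PySem.Set.mem_add, ← h3]
          constructor
          · rintro (hkc | hks)
            · exact hkc
            · exact absurd hks hk
          · exact Or.inl
        · rw [if_neg hdne]; exact h3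

-- one pvAStep/pvBStep iteration preserves the invariant, for ANY ids_by_sentence state
theorem pv_contains_eq {ν₁ ν₂ : Type} (d₁ : PySem.Dict String ν₁) (d₂ : PySem.Dict String ν₂)
    (k : String) (hkeys : d₁.keys = d₂.keys) : d₁.contains k = d₂.contains k := by
  by_cases hm : k ∈ d₂.keys
  · rw [(PySem.Dict.contains_iff_mem_keys d₁ k).mpr (hkeys ▸ hm),
      (PySem.Dict.contains_iff_mem_keys d₂ k).mpr hm]
  · have h1 : ¬ d₁.contains k = true :=
      fun hc => hm (hkeys ▸ (PySem.Dict.contains_iff_mem_keys d₁ k).mp hc)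
    have h2 : ¬ d₂.contains k = true :=
      fun hc => hm ((PySem.Dict.contains_iff_mem_keys d₂ k).mp hc)
    simp at h1 h2; rw [h1, h2]

-- one pvAStep/pvBStep iteration preserves the invariant, for ANY ids_by_sentence state
theorem pvInv_step (ids : PySem.Dict String (List String))
    (sids : PySem.Dict String (List String))
    (fs : PySem.Dict String String) (conf : PySem.Set String) (line : String)
    (h : pvInv sids fs conf) :
    pvInv (pvAStep (ids, sids) line).2 (pvBStep (fs, conf) line).1
      (pvBStep (fs, conf) line).2 := by
  simp only [pvAStep, pvBStep]
  set sid := PySem.List.pyGetD (PySem.Str.split₀ line) 0 "" with hsid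
  set sen := PySem.Str.join " " (PySem.List.slice (PySem.Str.split₀ line) (some 3) (some (-1))) with hsen
  have hcore := pvStep_core sid sen sids fs conf h
  have hcont := pv_contains_eq sids fs sid h.1
  by_cases hc : fs.contains sid = false
  · have hsc : sids.contains sid = false := by rw [hcont]; exact hc
    rw [if_pos hsc, if_pos hc]
    rw [if_pos hsc, if_pos hc, if_pos hc] at hcore
    exact hcore
  · have hns : ¬ sids.contains sid = false := by rw [hcont]; exact hc
    rw [if_neg hns, if_neg hc]
    rw [if_neg hns, if_neg hc, if_neg hc] at hcore
    by_cases hd : fs.getD sid "" ≠ sen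
    · rw [if_pos hd]
      rw [if_pos hd] at hcore
      exact hcore
    · rw [if_neg hd]
      rw [if_neg hd] at hcore
      exact hcore

-- a state satisfying the invariant yields equal final outputs
theorem pvInv_final (sids : PySem.Dict String (List String))
    (fs : PySem.Dict String String) (conf : PySem.Set String)
    (h : pvInv sids fs conf) :
    sids.items.foldl
      (fun result p =>
        if 1 < (PySem.Set.ofList p.2).length then result ++ [p.1 ++ "\tSame ID is present."]
        else result) []
    = (fs.keys.filter (fun sid => PySem.Set.contains conf sid)).map
        (fun sid => sid ++ "\tSame ID is present.") := by
  obtain ⟨hkeys, hnd, _, hval⟩ := h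
  rw [PySem.List.foldl_append_ite
    (fun p : String × List String => 1 < (PySem.Set.ofList p.2).length)
    (fun p => p.1 ++ "\tSame ID is present."), List.nil_append]
  have hfilter : sids.items.filter (fun p => decide (1 < (PySem.Set.ofList p.2).length))
      = sids.items.filter (fun p => PySem.Set.contains conf p.1) := by
    apply List.filter_congr
    intro p hp
    obtain ⟨k, v⟩ := p
    have hget := PySem.Dict.get?_of_mem_items sids hp hnd
    obtain ⟨h1, h2, h3⟩ := hval k v hget
    show decide (1 < (PySem.Set.ofList v).length) = PySem.Set.contains conf k
    by_cases hm : k ∈ conf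
    · have hl : 1 < (PySem.Set.ofList v).length := (pvSetLen v h1).mpr (h3.mp hm)
      rw [(PySem.Set.contains_iff conf k).mpr hm, decide_eq_true hl]
    · have hl : ¬ (1 < (PySem.Set.ofList v).length) :=
        fun hl => hm (h3.mpr ((pvSetLen v h1).mp hl))
      have hcv : PySem.Set.contains conf k = false := by
        cases hcv : PySem.Set.contains conf k
        · rfl
        · exact absurd ((PySem.Set.contains_iff conf k).mp hcv) hm
      rw [hcv, decide_eq_false hl]
  rw [hfilter, ← hkeys]
  show _ = ((sids.items.map Prod.fst).filter fun sid => PySem.Set.contains conf sid).map _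
  rw [List.filter_map, List.map_map]
  rfl

-- ===== VERDICT (by name: the statement is the Claim_ definition above) =====
theorem same_id_check_spec : Claim_equal_same_id_check := by
  intro output_lines _ _
  unfold Spec_same_id_check same_id_check same_id_check_alt
  have main : ∀ (l : List String) (ids sids fs conf),
      pvInv sids fs conf →
      pvInv (l.foldl pvAStep (ids, sids)).2 (l.foldl pvBStep (fs, conf)).1
        (l.foldl pvBStep (fs, conf)).2 := by
    intro l
    induction l with
    | nil => intro ids sids fs conf h; exact h
    | cons line rest ih =>
      intro ids sids fs conf h
      simp only [List.foldl_cons]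
      have hstep := pvInv_step ids sids fs conf line h
      have hsplit : (pvBStep (fs, conf) line)
          = ((pvBStep (fs, conf) line).1, (pvBStep (fs, conf) line).2) := rfl
      rw [hsplit]
      exact ih (pvAStep (ids, sids) line).1 _ _ _ hstep
  exact pvInv_final _ _ _
    (main output_lines PySem.Dict.empty PySem.Dict.empty PySem.Dict.empty PySem.Set.empty pvInv_empty)
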